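-- pv_equiv track=rewrite | github.com/mportdata/byte-pair-encoding-implementations | 07-memory-lean-representations/main.py | apply_pair_merge
-- ===== SOURCE A (Python) =====
-- from collections import Counter
--
-- PAIR_MASK = (1 << 32) - 1
--
-- def pack_pair(a: int, b: int) -> int:
--     return (a << 32) | b
--
-- def unpack_pair(pair_key: int) -> tuple[int, int]:
--     return pair_key >> 32, pair_key & PAIR_MASK
--
-- def _count_pairs_in_type(seq: list[int]) -> Counter[int]:
--     return Counter(pack_pair(a, b) for a, b in zip(seq, seq[1:])) if len(seq) >= 2 else Counter()
--
-- def _update_pair_in_type_seq(type_seq: list[int], pair_key: int, token: int) -> list[int]: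
--     a, b = unpack_pair(pair_key)
--     new_seq: list[int] = []
--     i = 0
--     while i < len(type_seq):
--         if i < len(type_seq) - 1 and type_seq[i] == a and type_seq[i + 1] == b:
--             new_seq.append(token)
--             i += 2  # Skip the next byte since it's part of the pair
--         else:
--             new_seq.append(type_seq[i])
--             i += 1
--     return new_seq
--
-- def _apply_weighted_local_to_global(
--     global_pairs: Counter[int],
--     local_pairs: Counter[int],
--     type_frequency: int,
--     sign: int,  # -1 for subtract, +1 for add
-- ) -> None:
--     for pair_key, count in local_pairs.items():
--         global_pairs[pair_key] += sign * count * type_frequency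
--         if global_pairs[pair_key] == 0:
--             del global_pairs[pair_key]
--
-- def apply_pair_merge(
--     type_seqs: list[list[int]],
--     type_freqs: list[int],
--     pairs_by_type_id: list[Counter[int]],
--     pair_to_type_ids: dict[int, list[int]],
--     pair_counter: Counter[int],
--     pair_key: int,
--     token: int,
-- ) -> tuple[list[list[int]], list[Counter[int]], dict[int, list[int]], Counter[int]]:
--     affected_type_ids = pair_to_type_ids.get(pair_key, [])
--     for type_id in affected_type_ids:
--         old_local_counter = pairs_by_type_id[type_id]
--         if old_local_counter.get(pair_key, 0) == 0:
--             continue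
--
--         _apply_weighted_local_to_global(pair_counter, old_local_counter, type_freqs[type_id], -1)
--
--         new_seq = _update_pair_in_type_seq(type_seqs[type_id], pair_key, token)
--         type_seqs[type_id] = new_seq
--
--         new_local_counter = _count_pairs_in_type(new_seq)
--         pairs_by_type_id[type_id] = new_local_counter
--
--         _apply_weighted_local_to_global(pair_counter, new_local_counter, type_freqs[type_id], +1)
--
--         for new_pair_key in new_local_counter:
--             if new_pair_key not in old_local_counter:
--                 pair_to_type_ids.setdefault(new_pair_key, []).append(type_id)
--
--     return type_seqs, pairs_by_type_id, pair_to_type_ids, pair_counter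
-- ===== SOURCE B (Python) =====
-- def apply_pair_merge(
--     type_seqs,
--     type_freqs,
--     pairs_by_type_id,
--     pair_to_type_ids,
--     pair_counter,
--     pair_key,
--     token,
-- ):
--     a, b = pair_key >> 32, pair_key & ((1 << 32) - 1)
--     for type_id in pair_to_type_ids.get(pair_key, []):
--         old_local = pairs_by_type_id[type_id]
--         if old_local.get(pair_key, 0) == 0:
--             continue
--         freq = type_freqs[type_id]
--
--         # remove this type's old contribution from the global counts
--         for k, c in old_local.items():
--             v = pair_counter.get(k, 0) - c * freq
--             if v:
--                 pair_counter[k] = v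
--             else:
--                 pair_counter.pop(k, None)
--
--         # rebuild by chunks: jump straight to the next candidate 'a' with
--         # list.index and copy the untouched stretch in one slice
--         seq = type_seqs[type_id]
--         n = len(seq)
--         new_seq = []
--         i = 0
--         while True:
--             try:
--                 j = seq.index(a, i, n - 1)
--             except ValueError:
--                 new_seq.extend(seq[i:])
--                 break
--             if seq[j + 1] == b:
--                 new_seq.extend(seq[i:j])
--                 new_seq.append(token)
--                 i = j + 2
--             else:
--                 new_seq.extend(seq[i:j + 1])
--                 i = j + 1
--         type_seqs[type_id] = new_seq
--
--         # recount the rebuilt sequence's pairs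
--         new_local = {}
--         for x, y in zip(new_seq, new_seq[1:]):
--             k = (x << 32) | y
--             new_local[k] = new_local.get(k, 0) + 1
--         pairs_by_type_id[type_id] = new_local
--
--         # add the new contribution to the global counts
--         for k, c in new_local.items():
--             v = pair_counter.get(k, 0) + c * freq
--             if v:
--                 pair_counter[k] = v
--             else:
--                 pair_counter.pop(k, None)
--
--         for k in new_local:
--             if k not in old_local:
--                 pair_to_type_ids.setdefault(k, []).append(type_id)
--
--     return type_seqs, pairs_by_type_id, pair_to_type_ids, pair_counter
-- ===== Notes on version B (the rewrite author's own statement) =====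
-- stated objective: alternative
-- what changed: Per affected type, B rebuilds the sequence chunk-wise: it jumps straight to the next candidate occurrence of the pair's first element with list.index(a, i, n-1) and copies the untouched stretch as one slice, instead of A's element-by-element index walk; the pair recount is a plain dict loop over zip(new_seq, new_seq[1:]) and the signed Counter helper is inlined as separate subtract/add passes.
import Mathlib
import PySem

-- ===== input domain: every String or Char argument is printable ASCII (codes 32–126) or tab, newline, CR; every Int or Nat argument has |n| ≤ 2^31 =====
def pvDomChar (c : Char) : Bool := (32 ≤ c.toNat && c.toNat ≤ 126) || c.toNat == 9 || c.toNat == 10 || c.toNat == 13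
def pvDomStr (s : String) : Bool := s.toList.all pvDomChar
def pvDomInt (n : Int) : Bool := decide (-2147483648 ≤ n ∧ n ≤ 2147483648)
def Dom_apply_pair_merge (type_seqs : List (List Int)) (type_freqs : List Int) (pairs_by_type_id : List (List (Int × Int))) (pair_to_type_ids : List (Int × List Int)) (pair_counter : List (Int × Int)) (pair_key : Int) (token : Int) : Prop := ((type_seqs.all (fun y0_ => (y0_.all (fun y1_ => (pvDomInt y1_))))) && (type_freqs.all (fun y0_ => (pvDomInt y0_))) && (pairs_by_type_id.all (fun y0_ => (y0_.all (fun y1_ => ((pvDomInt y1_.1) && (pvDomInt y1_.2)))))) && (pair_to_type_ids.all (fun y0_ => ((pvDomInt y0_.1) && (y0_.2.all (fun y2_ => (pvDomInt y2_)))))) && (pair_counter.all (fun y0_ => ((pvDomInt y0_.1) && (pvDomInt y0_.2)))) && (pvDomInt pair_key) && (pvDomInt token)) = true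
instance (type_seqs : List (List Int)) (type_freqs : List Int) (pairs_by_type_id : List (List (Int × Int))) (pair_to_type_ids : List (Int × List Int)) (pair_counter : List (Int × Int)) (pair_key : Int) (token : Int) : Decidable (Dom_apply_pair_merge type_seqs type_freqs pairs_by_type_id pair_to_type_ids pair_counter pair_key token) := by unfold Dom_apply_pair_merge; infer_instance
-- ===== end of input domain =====

-- ===== PORT A =====
-- B rebuilds each affected sequence chunk-wise, jumping to the next candidate position with
-- an index search, instead of A's per-element scan; RETURN-value equivalence only: both
-- Pythons also mutate their list/dict arguments in place (B performs the same mutations as A).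
def pvA_pack (a b : Int) : Int := PySem.Int.bor (a <<< (32 : Nat)) b

def pvA_unpack (p : Int) : Int × Int := (p >>> (32 : Nat), PySem.Int.band p (((1 : Int) <<< (32 : Nat)) - 1))

def pvA_countPairs (seq : List Int) : PySem.Dict Int Int :=
  if PySem.List.len seq ≥ 2 then
    PySem.Dict.counter ((seq.zip (PySem.List.slice seq (some 1) none)).map (fun p => pvA_pack p.1 p.2))
  else PySem.Dict.empty

def pvA_updateLoop (ts : List Int) (a b tok : Int) (i : Nat) (acc : List Int) : List Int :=
  if i < ts.length then
    (if i < ts.length - 1 ∧ ts.getD i 0 = a ∧ ts.getD (i + 1) 0 = b then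
      pvA_updateLoop ts a b tok (i + 2) (acc ++ [tok])
    else
      pvA_updateLoop ts a b tok (i + 1) (acc ++ [ts.getD i 0]))
  else acc
termination_by ts.length - i

def pvA_update (ts : List Int) (pk tok : Int) : List Int :=
  let ab := pvA_unpack pk
  pvA_updateLoop ts ab.1 ab.2 tok 0 []

def pvA_applyW (g : PySem.Dict Int Int) (loc : PySem.Dict Int Int) (freq sign : Int) : PySem.Dict Int Int :=
  loc.items.foldl (fun g p =>
    let v := g.getD p.1 0 + sign * p.2 * freq
    let g' := g.insert p.1 v
    if v = 0 then g'.erase p.1 else g') g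

def apply_pair_merge (type_seqs : List (List Int)) (type_freqs : List Int) (pairs_by_type_id : List (List (Int × Int))) (pair_to_type_ids : List (Int × List Int)) (pair_counter : List (Int × Int)) (pair_key : Int) (token : Int) : List (List Int) × (List (List (Int × Int))) × (List (Int × List Int)) × (List (Int × Int)) :=
  let st := ((PySem.Dict.mk pair_to_type_ids).getD pair_key []).foldl
    (fun st tid =>
      let old := PySem.List.pyGetD st.2.1 tid PySem.Dict.empty
      if old.getD pair_key 0 = 0 then st
      else
        let pc1 := pvA_applyW st.2.2.2 old (PySem.List.pyGetD type_freqs tid 0) (-1)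
        let newSeq := pvA_update (PySem.List.pyGetD st.1 tid []) pair_key token
        let tss' := PySem.List.pySetD st.1 tid newSeq
        let newLocal := pvA_countPairs newSeq
        let pbt' := PySem.List.pySetD st.2.1 tid newLocal
        let pc2 := pvA_applyW pc1 newLocal (PySem.List.pyGetD type_freqs tid 0) 1
        let ptt' := newLocal.keys.foldl
          (fun d k => if old.contains k then d else d.modify k [] (fun l => l ++ [tid])) st.2.2.1
        (tss', pbt', ptt', pc2))
    (type_seqs, pairs_by_type_id.map PySem.Dict.mk, PySem.Dict.mk pair_to_type_ids, PySem.Dict.mk pair_counter)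
  (st.1, st.2.1.map PySem.Dict.items, st.2.2.1.items, st.2.2.2.items)

-- ===== PORT B =====
def pvB_pack (a b : Int) : Int := PySem.Int.bor (a <<< (32 : Nat)) b

-- hand port (exact) of Source B's 'seq.index(a, i, n - 1)': first index j with i ≤ j < stop and
-- seq[j] = a (stop = len(seq) - 1 at the call site, so every probed index is in range);
-- none is exactly Python's ValueError
def pvB_find (seq : List Int) (a : Int) (i stop : Nat) : Option Nat :=
  if i < stop then
    (if seq.getD i 0 = a then some i else pvB_find seq a (i + 1) stop)
  else none
termination_by stop - i

-- Source B's 'while True' rebuild loop; the fuel only makes the same computation total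
-- (length + 1 iterations always suffice: each pass after a hit/miss advances i)
def pvB_mergeLoop (seq : List Int) (a b tok : Int) : Nat → Nat → List Int → List Int
  | 0, _, acc => acc
  | fuel + 1, i, acc =>
    match pvB_find seq a i (seq.length - 1) with
    | none => acc ++ PySem.List.slice seq (some (i : Int)) none
    | some j =>
      -- seq[j + 1]: in range since j < len - 1, so the default is never read
      if PySem.List.pyGetD seq ((j : Int) + 1) 0 = b then
        pvB_mergeLoop seq a b tok fuel (j + 2) (acc ++ PySem.List.slice seq (some (i : Int)) (some (j : Int)) ++ [tok])
      else
        pvB_mergeLoop seq a b tok fuel (j + 1) (acc ++ PySem.List.slice seq (some (i : Int)) (some ((j : Int) + 1)))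

def apply_pair_merge_alt (type_seqs : List (List Int)) (type_freqs : List Int) (pairs_by_type_id : List (List (Int × Int))) (pair_to_type_ids : List (Int × List Int)) (pair_counter : List (Int × Int)) (pair_key : Int) (token : Int) : List (List Int) × (List (List (Int × Int))) × (List (Int × List Int)) × (List (Int × Int)) :=
  let a := pair_key >>> (32 : Nat)
  let b := PySem.Int.band pair_key (((1 : Int) <<< (32 : Nat)) - 1)
  let st := ((PySem.Dict.mk pair_to_type_ids).getD pair_key []).foldl
    (fun st tid =>
      let old := PySem.List.pyGetD st.2.1 tid PySem.Dict.empty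
      if old.getD pair_key 0 = 0 then st
      else
        let freq := PySem.List.pyGetD type_freqs tid 0
        -- remove this type's old contribution from the global counts
        let pc1 := old.items.foldl (fun g p =>
          let v := g.getD p.1 0 - p.2 * freq
          if v ≠ 0 then g.insert p.1 v else g.erase p.1) st.2.2.2
        -- rebuild by chunks, jumping to candidate positions
        let seq := PySem.List.pyGetD st.1 tid []
        let newSeq := pvB_mergeLoop seq a b token (seq.length + 1) 0 []
        let tss' := PySem.List.pySetD st.1 tid newSeq
        -- recount the rebuilt sequence's pairs
        let newLocal := (newSeq.zip (PySem.List.slice newSeq (some 1) none)).foldl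
          (fun d p =>
            let k := pvB_pack p.1 p.2
            d.insert k (d.getD k 0 + 1)) (PySem.Dict.empty : PySem.Dict Int Int)
        let pbt' := PySem.List.pySetD st.2.1 tid newLocal
        -- add the new contribution to the global counts
        let pc2 := newLocal.items.foldl (fun g p =>
          let v := g.getD p.1 0 + p.2 * freq
          if v ≠ 0 then g.insert p.1 v else g.erase p.1) pc1
        let ptt' := newLocal.keys.foldl
          (fun d k => if old.contains k then d else d.modify k [] (fun l => l ++ [tid])) st.2.2.1
        (tss', pbt', ptt', pc2))
    (type_seqs, pairs_by_type_id.map PySem.Dict.mk, PySem.Dict.mk pair_to_type_ids, PySem.Dict.mk pair_counter)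
  (st.1, st.2.1.map PySem.Dict.items, st.2.2.1.items, st.2.2.2.items)

-- ===== PRECONDITION & SPEC =====
-- Pre_ excludes exactly the inputs on which A raises IndexError: an affected type id out of
-- range for pairs_by_type_id, or one whose stored count of pair_key is nonzero (only those
-- reach the freq/seq lookups) and which is out of range for type_freqs or type_seqs.
def Pre_apply_pair_merge (type_seqs : List (List Int)) (type_freqs : List Int) (pairs_by_type_id : List (List (Int × Int))) (pair_to_type_ids : List (Int × List Int)) (pair_counter : List (Int × Int)) (pair_key : Int) (token : Int) : Prop :=
  ∀ tid ∈ (PySem.Dict.mk pair_to_type_ids).getD pair_key [],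
    PySem.Raise.InRange pairs_by_type_id.length tid ∧
    ((PySem.Dict.mk (PySem.List.pyGetD pairs_by_type_id tid [])).getD pair_key 0 ≠ 0 →
      PySem.Raise.InRange type_freqs.length tid ∧ PySem.Raise.InRange type_seqs.length tid)
instance (type_seqs : List (List Int)) (type_freqs : List Int) (pairs_by_type_id : List (List (Int × Int))) (pair_to_type_ids : List (Int × List Int)) (pair_counter : List (Int × Int)) (pair_key : Int) (token : Int) : Decidable (Pre_apply_pair_merge type_seqs type_freqs pairs_by_type_id pair_to_type_ids pair_counter pair_key token) := by unfold Pre_apply_pair_merge; infer_instance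

def pvWitness_apply_pair_merge : List (List Int) × List Int × (List (List (Int × Int))) × (List (Int × List Int)) × (List (Int × Int)) × Int × Int :=
  ([[0, 2]], [1], [[(2, 1)]], [(2, [0])], [(2, 1)], 2, 9)

def Spec_apply_pair_merge (type_seqs : List (List Int)) (type_freqs : List Int) (pairs_by_type_id : List (List (Int × Int))) (pair_to_type_ids : List (Int × List Int)) (pair_counter : List (Int × Int)) (pair_key : Int) (token : Int) (out : List (List Int) × (List (List (Int × Int))) × (List (Int × List Int)) × (List (Int × Int))) : Prop := out = apply_pair_merge_alt type_seqs type_freqs pairs_by_type_id pair_to_type_ids pair_counter pair_key token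
instance (type_seqs : List (List Int)) (type_freqs : List Int) (pairs_by_type_id : List (List (Int × Int))) (pair_to_type_ids : List (Int × List Int)) (pair_counter : List (Int × Int)) (pair_key : Int) (token : Int) (out : List (List Int) × (List (List (Int × Int))) × (List (Int × List Int)) × (List (Int × Int))) : Decidable (Spec_apply_pair_merge type_seqs type_freqs pairs_by_type_id pair_to_type_ids pair_counter pair_key token out) := by unfold Spec_apply_pair_merge; infer_instance

-- ===== CLAIM (what is proved, stated in full; the proofs are below) =====
def Claim_equal_apply_pair_merge : Prop := ∀ (type_seqs : List (List Int)) (type_freqs : List Int) (pairs_by_type_id : List (List (Int × Int))) (pair_to_type_ids : List (Int × List Int)) (pair_counter : List (Int × Int)) (pair_key : Int) (token : Int), Dom_apply_pair_merge type_seqs type_freqs pairs_by_type_id pair_to_type_ids pair_counter pair_key token → Pre_apply_pair_merge type_seqs type_freqs pairs_by_type_id pair_to_type_ids pair_counter pair_key token → Spec_apply_pair_merge type_seqs type_freqs pairs_by_type_id pair_to_type_ids pair_counter pair_key token (apply_pair_merge type_seqs type_freqs pairs_by_type_id pair_to_type_ids pair_counter pair_key token)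

-- ===== LEMMAS AND PROOFS =====

-- the merged sequence, as a structural recursion (common characterisation of both rebuild loops)
def pvMerge (a b tok : Int) : List Int → List Int
  | x :: y :: r => if x = a ∧ y = b then tok :: pvMerge a b tok r else x :: pvMerge a b tok (y :: r)
  | l => l

def pvPacks (l : List Int) : List Int := (l.zip l.tail).map (fun p => pvB_pack p.1 p.2)

lemma pv_filter_map_replace (k : Int) (v : Int) (l : List (Int × Int)) :
    (l.map (fun p => if (p.1 == k) = true then (k, v) else p)).filter (fun p => !p.1 == k)
      = l.filter (fun p => !p.1 == k) := by
  induction l with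
  | nil => rfl
  | cons p t ih =>
    simp only [List.map_cons, List.filter_cons]
    by_cases hp : p.1 = k
    · rw [if_pos (by simp [hp] : (p.1 == k) = true)]
      rw [if_neg (by simp : ¬((!((k : Int) == k)) = true)),
          if_neg (by simp [hp] : ¬((!(p.1 == k)) = true))]
      exact ih
    · rw [if_neg (by simp [hp] : ¬((p.1 == k) = true))]
      rw [if_pos (by simp [hp] : (!(p.1 == k)) = true),
          if_pos (by simp [hp] : (!(p.1 == k)) = true)]
      rw [ih]

lemma pv_erase_insert (d : PySem.Dict Int Int) (k v : Int) :
    (d.insert k v).erase k = d.erase k := by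
  by_cases hc : d.contains k = true
  · simp only [PySem.Dict.insert, hc, if_true, PySem.Dict.erase]
    exact congrArg PySem.Dict.mk (pv_filter_map_replace k v d.items)
  · simp only [PySem.Dict.insert, hc, PySem.Dict.erase]
    apply congrArg PySem.Dict.mk
    simp [List.filter_append]

lemma pvA_applyW_sub (g loc : PySem.Dict Int Int) (freq : Int) :
    pvA_applyW g loc freq (-1)
      = loc.items.foldl (fun g p =>
          let v := g.getD p.1 0 - p.2 * freq
          if v ≠ 0 then g.insert p.1 v else g.erase p.1) g := by
  unfold pvA_applyW
  have hf : (fun (g : PySem.Dict Int Int) (p : Int × Int) =>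
        let v := g.getD p.1 0 + (-1) * p.2 * freq
        let g' := g.insert p.1 v
        if v = 0 then g'.erase p.1 else g')
      = (fun (g : PySem.Dict Int Int) (p : Int × Int) =>
        let v := g.getD p.1 0 - p.2 * freq
        if v ≠ 0 then g.insert p.1 v else g.erase p.1) := by
    funext g p
    simp only
    have hv : g.getD p.1 0 + (-1) * p.2 * freq = g.getD p.1 0 - p.2 * freq := by ring
    rw [hv]
    by_cases h0 : g.getD p.1 0 - p.2 * freq = 0
    · simp [h0, pv_erase_insert]
    · simp [h0]
  rw [hf]

lemma pvA_applyW_add (g loc : PySem.Dict Int Int) (freq : Int) :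
    pvA_applyW g loc freq 1
      = loc.items.foldl (fun g p =>
          let v := g.getD p.1 0 + p.2 * freq
          if v ≠ 0 then g.insert p.1 v else g.erase p.1) g := by
  unfold pvA_applyW
  have hf : (fun (g : PySem.Dict Int Int) (p : Int × Int) =>
        let v := g.getD p.1 0 + 1 * p.2 * freq
        let g' := g.insert p.1 v
        if v = 0 then g'.erase p.1 else g')
      = (fun (g : PySem.Dict Int Int) (p : Int × Int) =>
        let v := g.getD p.1 0 + p.2 * freq
        if v ≠ 0 then g.insert p.1 v else g.erase p.1) := by
    funext g p
    simp only
    have hv : g.getD p.1 0 + 1 * p.2 * freq = g.getD p.1 0 + p.2 * freq := by ring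
    rw [hv]
    by_cases h0 : g.getD p.1 0 + p.2 * freq = 0
    · simp [h0, pv_erase_insert]
    · simp [h0]
  rw [hf]

lemma pvA_updateLoop_eq (n : Nat) (ts : List Int) (a b tok : Int) :
    ∀ (i : Nat) (acc : List Int), ts.length - i ≤ n →
    pvA_updateLoop ts a b tok i acc = acc ++ pvMerge a b tok (ts.drop i) := by
  induction n with
  | zero =>
    intro i acc hle
    have h : ¬ i < ts.length := by omega
    rw [pvA_updateLoop, if_neg h, List.drop_eq_nil_of_le (by omega)]
    simp [pvMerge]
  | succ n ihn =>
    intro i acc hle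
    rw [pvA_updateLoop]
    by_cases h : i < ts.length
    · rw [if_pos h]
      by_cases hg : i < ts.length - 1 ∧ ts.getD i 0 = a ∧ ts.getD (i + 1) 0 = b
      · rw [if_pos hg]
        rw [ihn (i + 2) (acc ++ [tok]) (by omega)]
        have h1 : i + 1 < ts.length := by omega
        have hd : ts.drop i = ts[i] :: ts[i + 1] :: ts.drop (i + 2) := by
          rw [List.drop_eq_getElem_cons h, List.drop_eq_getElem_cons h1]
        have ha : ts[i] = a := by
          have := hg.2.1; rwa [List.getD_eq_getElem ts 0 h] at this
        have hb : ts[i + 1] = b := by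
          have := hg.2.2; rwa [List.getD_eq_getElem ts 0 h1] at this
        rw [hd]
        show acc ++ [tok] ++ pvMerge a b tok (ts.drop (i + 2))
          = acc ++ pvMerge a b tok (ts[i] :: ts[i + 1] :: ts.drop (i + 2))
        rw [show pvMerge a b tok (ts[i] :: ts[i + 1] :: ts.drop (i + 2))
              = tok :: pvMerge a b tok (ts.drop (i + 2)) by
            rw [pvMerge]; rw [if_pos ⟨ha, hb⟩]]
        simp
      · rw [if_neg hg]
        rw [ihn (i + 1) (acc ++ [ts.getD i 0]) (by omega)]
        have hd0 : ts.drop i = ts[i] :: ts.drop (i + 1) := List.drop_eq_getElem_cons h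
        have hgd : ts.getD i 0 = ts[i] := List.getD_eq_getElem ts 0 h
        by_cases h1 : i + 1 < ts.length
        · have hd1 : ts.drop (i + 1) = ts[i + 1] :: ts.drop (i + 2) := List.drop_eq_getElem_cons h1
          have hne : ¬ (ts[i] = a ∧ ts[i + 1] = b) := by
            intro hcon
            exact hg ⟨by omega, by rw [List.getD_eq_getElem ts 0 h]; exact hcon.1,
              by rw [List.getD_eq_getElem ts 0 h1]; exact hcon.2⟩
          rw [hd0, hd1, hgd]
          rw [show pvMerge a b tok (ts[i] :: ts[i + 1] :: ts.drop (i + 2))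
                = ts[i] :: pvMerge a b tok (ts[i + 1] :: ts.drop (i + 2)) by
              rw [pvMerge]; rw [if_neg hne]]
          simp
        · have hnil : ts.drop (i + 1) = [] := List.drop_eq_nil_of_le (by omega)
          rw [hd0, hnil, hgd]
          simp [pvMerge]
    · rw [if_neg h, List.drop_eq_nil_of_le (by omega)]
      simp [pvMerge]

lemma pvA_update_eq (ts : List Int) (pk tok : Int) :
    pvA_update ts pk tok
      = pvMerge (pk >>> (32 : Nat)) (PySem.Int.band pk (((1 : Int) <<< (32 : Nat)) - 1)) tok ts := by
  show pvA_updateLoop ts (pvA_unpack pk).1 (pvA_unpack pk).2 tok 0 [] = _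
  rw [show pvA_unpack pk = (pk >>> (32 : Nat), PySem.Int.band pk (((1 : Int) <<< (32 : Nat)) - 1)) from rfl]
  rw [pvA_updateLoop_eq ts.length ts _ _ tok 0 [] (by omega)]
  simp

-- pvB_find: search specification
lemma pvB_find_some (seq : List Int) (a : Int) :
    ∀ (n i stop j : Nat), stop - i ≤ n → pvB_find seq a i stop = some j →
      i ≤ j ∧ j < stop ∧ seq.getD j 0 = a ∧ (∀ p, i ≤ p → p < j → seq.getD p 0 ≠ a) := by
  intro n
  induction n with
  | zero =>
    intro i stop j hn hf
    rw [pvB_find, if_neg (by omega : ¬ i < stop)] at hf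
    exact absurd hf (by simp)
  | succ n ihn =>
    intro i stop j hn hf
    rw [pvB_find] at hf
    by_cases hi : i < stop
    · rw [if_pos hi] at hf
      by_cases ha : seq.getD i 0 = a
      · rw [if_pos ha] at hf
        obtain rfl : i = j := by simpa using hf
        exact ⟨le_rfl, hi, ha, fun p h1 h2 _ => by omega⟩
      · rw [if_neg ha] at hf
        obtain ⟨h1, h2, h3, h4⟩ := ihn (i + 1) stop j (by omega) hf
        refine ⟨by omega, h2, h3, fun p hp1 hp2 => ?_⟩
        by_cases hpi : p = i
        · subst hpi; exact ha
        · exact h4 p (by omega) hp2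
    · rw [if_neg hi] at hf
      exact absurd hf (by simp)

lemma pvB_find_none (seq : List Int) (a : Int) :
    ∀ (n i stop : Nat), stop - i ≤ n → pvB_find seq a i stop = none →
      ∀ p, i ≤ p → p < stop → seq.getD p 0 ≠ a := by
  intro n
  induction n with
  | zero =>
    intro i stop hn _ p hp1 hp2
    omega
  | succ n ihn =>
    intro i stop hn hf p hp1 hp2
    rw [pvB_find, if_pos (by omega : i < stop)] at hf
    by_cases ha : seq.getD i 0 = a
    · rw [if_pos ha] at hf; exact absurd hf (by simp)
    · rw [if_neg ha] at hf
      by_cases hpi : p = i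
      · subst hpi; exact ha
      · exact ihn (i + 1) stop (by omega) hf p (by omega) hp2

-- pvMerge on a head that cannot start a match
lemma pvMerge_cons_ne (a b tok x : Int) (l : List Int) (hx : x ≠ a) :
    pvMerge a b tok (x :: l) = x :: pvMerge a b tok l := by
  cases l with
  | nil => simp [pvMerge]
  | cons y r =>
    rw [pvMerge, if_neg (fun hc => hx hc.1)]

lemma pvMerge_short (a b tok : Int) (l : List Int) (h : l.length ≤ 1) :
    pvMerge a b tok l = l := by
  match l, h with
  | [], _ => rfl
  | [x], _ => rfl

-- no candidate in [i, j): pvMerge copies seq[i:j] unchanged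
lemma pvMerge_skip (seq : List Int) (a b tok : Int) :
    ∀ (n i j : Nat), j - i ≤ n → i ≤ j → j ≤ seq.length →
      (∀ p, i ≤ p → p < j → seq.getD p 0 ≠ a) →
      pvMerge a b tok (seq.drop i) = (seq.drop i).take (j - i) ++ pvMerge a b tok (seq.drop j) := by
  intro n
  induction n with
  | zero =>
    intro i j hn hij _ _
    obtain rfl : j = i := by omega
    simp
  | succ n ihn =>
    intro i j hn hij hjl hno
    by_cases heq : i = j
    · subst heq; simp
    · have hilt : i < j := by omega
      have hil : i < seq.length := by omega
      have hd : seq.drop i = seq[i] :: seq.drop (i + 1) := List.drop_eq_getElem_cons hil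
      have hxa : seq[i] ≠ a := by
        have := hno i le_rfl hilt
        rwa [List.getD_eq_getElem seq 0 hil] at this
      rw [hd, pvMerge_cons_ne a b tok _ _ hxa]
      rw [ihn (i + 1) j (by omega) (by omega) hjl (fun p hp1 hp2 => hno p (by omega) hp2)]
      rw [show j - i = (j - (i + 1)) + 1 by omega, List.take_succ_cons]
      simp

-- no candidate from i up to the last position: pvMerge is the identity on the suffix
lemma pvMerge_tail (seq : List Int) (a b tok : Int) (i : Nat)
    (hno : ∀ p, i ≤ p → p < seq.length - 1 → seq.getD p 0 ≠ a) :
    pvMerge a b tok (seq.drop i) = seq.drop i := by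
  by_cases hsm : seq.length ≤ i + 1
  · exact pvMerge_short a b tok _ (by simp; omega)
  · have h1 : i ≤ seq.length - 1 := by omega
    rw [pvMerge_skip seq a b tok (seq.length - 1 - i) i (seq.length - 1) le_rfl h1 (by omega) hno]
    rw [pvMerge_short a b tok _ (by simp; omega)]
    rw [show seq.drop (seq.length - 1) = (seq.drop i).drop (seq.length - 1 - i) by
      rw [List.drop_drop]; congr 1; omega]
    exact List.take_append_drop _ _

-- B's chunked rebuild computes pvMerge
lemma pvB_mergeLoop_eq (seq : List Int) (a b tok : Int) :
    ∀ (fuel i : Nat) (acc : List Int), seq.length - i < fuel →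
      pvB_mergeLoop seq a b tok fuel i acc = acc ++ pvMerge a b tok (seq.drop i) := by
  intro fuel
  induction fuel with
  | zero => intro i acc h; omega
  | succ fuel ihf =>
    intro i acc hfi
    cases hf : pvB_find seq a i (seq.length - 1) with
    | none =>
      simp only [pvB_mergeLoop, hf]
      rw [PySem.List.slice_from_natCast]
      rw [pvMerge_tail seq a b tok i (pvB_find_none seq a (seq.length - 1 - i) i (seq.length - 1) le_rfl hf)]
    | some j =>
      obtain ⟨hij, hjs, hja, hmin⟩ :=
        pvB_find_some seq a (seq.length - 1 - i) i (seq.length - 1) j le_rfl hf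
      have hj1 : j + 1 < seq.length := by omega
      have hj : j < seq.length := by omega
      have hcast : ((j : Nat) : Int) + 1 = (((j + 1 : Nat) : Nat) : Int) := by push_cast; ring
      have hgd : PySem.List.pyGetD seq ((j : Int) + 1) 0 = seq[j + 1] := by
        rw [hcast, PySem.List.pyGetD_natCast, List.getD_eq_getElem seq 0 hj1]
      have hskip : pvMerge a b tok (seq.drop i)
          = (seq.drop i).take (j - i) ++ pvMerge a b tok (seq.drop j) :=
        pvMerge_skip seq a b tok (j - i) i j le_rfl hij (by omega) hmin
      have hdj : seq.drop j = seq[j] :: seq.drop (j + 1) := List.drop_eq_getElem_cons hj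
      have hdj1 : seq.drop (j + 1) = seq[j + 1] :: seq.drop (j + 2) := List.drop_eq_getElem_cons hj1
      have hsa : seq[j] = a := by rwa [List.getD_eq_getElem seq 0 hj] at hja
      simp only [pvB_mergeLoop, hf]
      by_cases hyb : seq[j + 1] = b
      · rw [if_pos (by rw [hgd]; exact hyb)]
        rw [ihf (j + 2) _ (by omega)]
        rw [PySem.List.slice_natCast]
        rw [hskip, hdj, hdj1]
        rw [show pvMerge a b tok (seq[j] :: seq[j + 1] :: seq.drop (j + 2))
              = tok :: pvMerge a b tok (seq.drop (j + 2)) by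
            rw [pvMerge]; rw [if_pos ⟨hsa, hyb⟩]]
        simp
      · rw [if_neg (by rw [hgd]; exact hyb)]
        rw [ihf (j + 1) _ (by omega)]
        rw [hcast, PySem.List.slice_natCast]
        rw [hskip, hdj, hdj1]
        rw [show pvMerge a b tok (seq[j] :: seq[j + 1] :: seq.drop (j + 2))
              = seq[j] :: pvMerge a b tok (seq[j + 1] :: seq.drop (j + 2)) by
            rw [pvMerge]; rw [if_neg (fun hc => hyb hc.2)]]
        have htake : (seq.drop i).take (j + 1 - i) = (seq.drop i).take (j - i) ++ [seq[j]] := by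
          rw [show j + 1 - i = (j - i) + 1 by omega, List.take_add_one]
          congr 1
          have : (seq.drop i)[j - i]? = some seq[j] := by
            rw [List.getElem?_drop]
            rw [show i + (j - i) = j by omega]
            exact List.getElem?_eq_getElem hj
          rw [this]
          rfl
        rw [htake]
        simp

def pvPacksA (l : List Int) : List Int := (l.zip l.tail).map (fun p => pvA_pack p.1 p.2)

lemma pvA_countPairs_eq (M : List Int) : pvA_countPairs M = PySem.Dict.counter (pvPacksA M) := by
  unfold pvA_countPairs
  by_cases h : PySem.List.len M ≥ 2
  · rw [if_pos h, PySem.List.slice_from_one]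
    rfl
  · rw [if_neg h]
    match M, h with
    | [], _ => rfl
    | [x], _ => rfl
    | x :: y :: r, h => exact absurd (by simp [PySem.List.len_eq]; omega) h

-- B's recount loop computes A's Counter-of-zip
lemma pvB_count_eq (l : List Int) :
    (l.zip (PySem.List.slice l (some 1) none)).foldl
      (fun d p =>
        let k := pvB_pack p.1 p.2
        d.insert k (d.getD k 0 + 1)) (PySem.Dict.empty : PySem.Dict Int Int)
      = pvA_countPairs l := by
  rw [pvA_countPairs_eq, PySem.List.slice_from_one]
  rw [show PySem.Dict.counter (pvPacksA l)
        = (pvPacksA l).foldl (fun d k => d.insert k (d.getD k 0 + 1)) PySem.Dict.empty from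
      (PySem.Dict.foldl_insert_getD_add_one_eq_counter _).symm]
  rw [pvPacksA, List.foldl_map]
  rfl

def pvStepA (type_freqs : List Int) (pair_key token : Int) :
    (List (List Int) × List (PySem.Dict Int Int) × PySem.Dict Int (List Int) × PySem.Dict Int Int) → Int →
    (List (List Int) × List (PySem.Dict Int Int) × PySem.Dict Int (List Int) × PySem.Dict Int Int) :=
  fun st tid =>
    let old := PySem.List.pyGetD st.2.1 tid PySem.Dict.empty
    if old.getD pair_key 0 = 0 then st
    else
      let pc1 := pvA_applyW st.2.2.2 old (PySem.List.pyGetD type_freqs tid 0) (-1)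
      let newSeq := pvA_update (PySem.List.pyGetD st.1 tid []) pair_key token
      let tss' := PySem.List.pySetD st.1 tid newSeq
      let newLocal := pvA_countPairs newSeq
      let pbt' := PySem.List.pySetD st.2.1 tid newLocal
      let pc2 := pvA_applyW pc1 newLocal (PySem.List.pyGetD type_freqs tid 0) 1
      let ptt' := newLocal.keys.foldl
        (fun d k => if old.contains k then d else d.modify k [] (fun l => l ++ [tid])) st.2.2.1
      (tss', pbt', ptt', pc2)

def pvStepB (type_freqs : List Int) (pair_key token : Int) :
    (List (List Int) × List (PySem.Dict Int Int) × PySem.Dict Int (List Int) × PySem.Dict Int Int) → Int →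
    (List (List Int) × List (PySem.Dict Int Int) × PySem.Dict Int (List Int) × PySem.Dict Int Int) :=
  fun st tid =>
    let a := pair_key >>> (32 : Nat)
    let b := PySem.Int.band pair_key (((1 : Int) <<< (32 : Nat)) - 1)
    let old := PySem.List.pyGetD st.2.1 tid PySem.Dict.empty
    if old.getD pair_key 0 = 0 then st
    else
      let freq := PySem.List.pyGetD type_freqs tid 0
      let pc1 := old.items.foldl (fun g p =>
        let v := g.getD p.1 0 - p.2 * freq
        if v ≠ 0 then g.insert p.1 v else g.erase p.1) st.2.2.2
      let seq := PySem.List.pyGetD st.1 tid []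
      let newSeq := pvB_mergeLoop seq a b token (seq.length + 1) 0 []
      let tss' := PySem.List.pySetD st.1 tid newSeq
      let newLocal := (newSeq.zip (PySem.List.slice newSeq (some 1) none)).foldl
        (fun d p =>
          let k := pvB_pack p.1 p.2
          d.insert k (d.getD k 0 + 1)) (PySem.Dict.empty : PySem.Dict Int Int)
      let pbt' := PySem.List.pySetD st.2.1 tid newLocal
      let pc2 := newLocal.items.foldl (fun g p =>
        let v := g.getD p.1 0 + p.2 * freq
        if v ≠ 0 then g.insert p.1 v else g.erase p.1) pc1
      let ptt' := newLocal.keys.foldl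
        (fun d k => if old.contains k then d else d.modify k [] (fun l => l ++ [tid])) st.2.2.1
      (tss', pbt', ptt', pc2)

lemma pvStep_eq (tf : List Int) (pk tok : Int) : pvStepA tf pk tok = pvStepB tf pk tok := by
  funext st tid
  simp only [pvStepA, pvStepB]
  by_cases h : (PySem.List.pyGetD st.2.1 tid PySem.Dict.empty).getD pk 0 = 0
  · simp [h]
  · rw [if_neg h, if_neg h]
    rw [pvB_mergeLoop_eq (PySem.List.pyGetD st.1 tid [])
        (pk >>> (32 : Nat)) (PySem.Int.band pk (((1 : Int) <<< (32 : Nat)) - 1)) tok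
        ((PySem.List.pyGetD st.1 tid []).length + 1) 0 [] (by omega)]
    rw [List.drop_zero, List.nil_append]
    rw [pvB_count_eq, pvA_applyW_sub, pvA_applyW_add, pvA_update_eq]

theorem pv_witness_ok : Dom_apply_pair_merge (pvWitness_apply_pair_merge.1) (pvWitness_apply_pair_merge.2.1) (pvWitness_apply_pair_merge.2.2.1) (pvWitness_apply_pair_merge.2.2.2.1) (pvWitness_apply_pair_merge.2.2.2.2.1) (pvWitness_apply_pair_merge.2.2.2.2.2.1) (pvWitness_apply_pair_merge.2.2.2.2.2.2) ∧ Pre_apply_pair_merge (pvWitness_apply_pair_merge.1) (pvWitness_apply_pair_merge.2.1) (pvWitness_apply_pair_merge.2.2.1) (pvWitness_apply_pair_merge.2.2.2.1) (pvWitness_apply_pair_merge.2.2.2.2.1) (pvWitness_apply_pair_merge.2.2.2.2.2.1) (pvWitness_apply_pair_merge.2.2.2.2.2.2) := by decide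

-- ===== VERDICT (by name: the statement is the Claim_ definition above) =====
theorem apply_pair_merge_spec : Claim_equal_apply_pair_merge := by
  intro ts tf pbt ptt pc pk tok _ _
  unfold Spec_apply_pair_merge
  exact congrArg
    (fun st : List (List Int) × List (PySem.Dict Int Int) × PySem.Dict Int (List Int) × PySem.Dict Int Int =>
      (st.1, st.2.1.map PySem.Dict.items, st.2.2.1.items, st.2.2.2.items))
    (by rw [pvStep_eq tf pk tok] :
      ((PySem.Dict.mk ptt).getD pk []).foldl (pvStepA tf pk tok)
          (ts, pbt.map PySem.Dict.mk, PySem.Dict.mk ptt, PySem.Dict.mk pc)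
        = ((PySem.Dict.mk ptt).getD pk []).foldl (pvStepB tf pk tok)
          (ts, pbt.map PySem.Dict.mk, PySem.Dict.mk ptt, PySem.Dict.mk pc))
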